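-- pv_equiv track=rewrite | github.com/gudfit/HeavenHellII | src/showcase.py | alternating_k_2k_seed_cover_ring
-- ===== SOURCE A (Python) =====
-- from typing import Dict, Hashable, Iterable, List, Mapping, Tuple, Set
--
-- def periodic_seed_cover_ring(
--     n: int, k: int, offset: int = 0, spacing: int | None = None
-- ) -> List[int]:
--     """
--     Periodic seed set on a k-nearest ring.
--     For the two-step sufficient condition with W = 2k-1 and tau = 0 to hold
--     for every node (including seeds), each node must have at least one other
--     seed within distance <= k. The simple certified choice is spacing = k.
--
--     spacing:
--       - If None, defaults to spacing = k (certified).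
--       - You may pass a smaller spacing (<= k) to be even more conservative.
--     """
--     p = spacing if spacing is not None else k
--     assert 1 <= p <= k, "For certified two-step inequality, require spacing <= k."
--     return sorted({(offset + i) % n for i in range(0, n, p)})
--
-- def alternating_k_2k_seed_cover_ring(n: int, k: int, offset: int = 0) -> List[int]:
--     """
--     Optional: a sparser periodic-but-alternating pattern with gaps k, 2k, k, 2k, ...
--     This satisfies the two constraints:
--       (i) max gap <= 2k  (so every non-seed has a seeded neighbor within k), and
--       (ii) no seed is flanked by two gaps > k  (so every seed has some seed within k).
--     It reduces seed count relative to spacing=k (~ every 1.5k on average).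
--     """
--     if 2 * k > n:
--         return periodic_seed_cover_ring(n, k, offset=offset, spacing=k)
--     pos = offset % n
--     H = [pos]
--     step = [k, 2 * k]
--     i = 0
--     while True:
--         pos = (pos + step[i % 2]) % n
--         if pos == H[0]:
--             break
--         H.append(pos)
--         i += 1
--     return sorted(set(H))
-- ===== SOURCE B (Python) =====
-- def _gcd(a: int, b: int) -> int:
--     while b:
--         a, b = b, a % b
--     return a
--
-- def alternating_k_2k_seed_cover_ring(n: int, k: int, offset: int = 0):
--     if 2 * k > n:
--         p = k
--         assert 1 <= p <= k, "For certified two-step inequality, require spacing <= k."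
--         return sorted({(offset + i) % n for i in range(0, n, p)})
--     # closed form: the walk returns to its start at the first index m* in the
--     # skip pattern (m % 3 != 2) divisible by d = |n| / gcd(|n|, |k|)
--     d = abs(n) // _gcd(abs(n), abs(k))
--     m_star = d if d % 3 != 2 else 2 * d
--     return sorted({(offset + k * m) % n for m in range(m_star) if m % 3 != 2})
-- ===== Notes on version B (the rewrite author's own statement) =====
-- stated objective: alternative
-- what changed: The stateful walk-until-repeat loop (running pos accumulator, step table, break on revisiting the start) is replaced by a closed-form computation: the walk's return index is d=|n|/gcd(|n|,|k|) (or 2d when d%3==2) and the seeds are enumerated directly as (offset+k*m)%n over the skip pattern m%3!=2.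
import Mathlib
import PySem

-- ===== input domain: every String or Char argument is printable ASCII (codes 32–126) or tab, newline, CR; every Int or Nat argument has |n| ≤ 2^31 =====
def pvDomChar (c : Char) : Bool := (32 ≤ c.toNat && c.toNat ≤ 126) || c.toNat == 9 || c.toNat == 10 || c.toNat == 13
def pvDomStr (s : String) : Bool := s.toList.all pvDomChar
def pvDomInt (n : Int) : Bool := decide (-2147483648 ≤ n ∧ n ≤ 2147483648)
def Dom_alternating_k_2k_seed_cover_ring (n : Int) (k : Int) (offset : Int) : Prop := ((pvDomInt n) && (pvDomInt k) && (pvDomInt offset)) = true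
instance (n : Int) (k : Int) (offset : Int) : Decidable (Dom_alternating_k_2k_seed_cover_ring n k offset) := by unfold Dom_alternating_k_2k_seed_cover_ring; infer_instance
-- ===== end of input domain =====

-- B replaces A's walk-until-repeat accumulator loop by computing the return index of the walk
-- in closed form from gcd(|n|,|k|) and enumerating the k,2k seed positions directly (objective: alternative).

-- ===== PORT A =====
-- shared module helper: periodic_seed_cover_ring with spacing=k (both A and B call it on the 2*k > n branch)
def pvPeriodic (n : Int) (k : Int) (offset : Int) : List Int :=
  PySem.List.sorted
    (PySem.Set.ofList ((PySem.List.pyRange 0 n k).map (fun i => PySem.Int.mod (offset + i) n)))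
    (fun x => x) false

-- A's 'while True' walk, with fuel (the fuel only makes the recursion total; under Pre_
-- the break is always reached before it runs out — proved below)
def pvLoopA (n : Int) (k : Int) : Nat → Int → List Int → Nat → List Int
  | 0, _, H, _ => H
  | fuel + 1, pos, H, i =>
      let pos' := PySem.Int.mod (pos + (if i % 2 = 0 then k else 2 * k)) n
      if pos' = PySem.List.pyGetD H 0 0 then H
      else pvLoopA n k fuel pos' (H ++ [pos']) (i + 1)

def alternating_k_2k_seed_cover_ring (n : Int) (k : Int) (offset : Int) : List Int :=
  if 2 * k > n then pvPeriodic n k offset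
  else
    let pos := PySem.Int.mod offset n
    let H := pvLoopA n k (2 * n.natAbs + 2) pos [pos] 0
    PySem.List.sorted (PySem.Set.ofList H) (fun x => x) false

-- ===== PORT B =====
-- Source B's _gcd helper: 'while b: a, b = b, a % b' (called on abs values, so Nat;
-- fuel b + 1 only makes the recursion total — b strictly decreases on every iteration)
def pvGcdFuel : Nat → Nat → Nat → Nat
  | 0, a, _ => a
  | f + 1, a, b => if b = 0 then a else pvGcdFuel f b (a % b)

def pvGcd (a : Nat) (b : Nat) : Nat := pvGcdFuel (b + 1) a b

def alternating_k_2k_seed_cover_ring_alt (n : Int) (k : Int) (offset : Int) : List Int :=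
  if 2 * k > n then pvPeriodic n k offset
  else
    let d := n.natAbs / pvGcd n.natAbs k.natAbs
    let mStar := if d % 3 ≠ 2 then d else 2 * d
    PySem.List.sorted
      (PySem.Set.ofList
        (((PySem.List.pyRange 0 (mStar : Int) 1).filter
            (fun m => decide (PySem.Int.mod m 3 ≠ 2))).map
          (fun m => PySem.Int.mod (offset + k * m) n)))
      (fun x => x) false

-- ===== PRECONDITION & SPEC =====
-- Pre_ excludes exactly the inputs where Python A raises: n < 0 with k ≤ 0 and 2k > n
-- (AssertionError in periodic_seed_cover_ring), and n = 0 with k ≤ 0 (ZeroDivisionError).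
def Pre_alternating_k_2k_seed_cover_ring (n : Int) (k : Int) (offset : Int) : Prop :=
  ¬ ((n < 0 ∧ k ≤ 0 ∧ n < 2 * k) ∨ (n = 0 ∧ k ≤ 0))
instance (n : Int) (k : Int) (offset : Int) : Decidable (Pre_alternating_k_2k_seed_cover_ring n k offset) := by unfold Pre_alternating_k_2k_seed_cover_ring; infer_instance

def pvWitness_alternating_k_2k_seed_cover_ring : Int × Int × Int := (7, 2, 3)

def Spec_alternating_k_2k_seed_cover_ring (n : Int) (k : Int) (offset : Int) (out : List Int) : Prop := out = alternating_k_2k_seed_cover_ring_alt n k offset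
instance (n : Int) (k : Int) (offset : Int) (out : List Int) : Decidable (Spec_alternating_k_2k_seed_cover_ring n k offset out) := by unfold Spec_alternating_k_2k_seed_cover_ring; infer_instance

-- ===== CLAIM (what is proved, stated in full; the proofs are below) =====
def Claim_equal_alternating_k_2k_seed_cover_ring : Prop := ∀ (n : Int) (k : Int) (offset : Int), Dom_alternating_k_2k_seed_cover_ring n k offset → Pre_alternating_k_2k_seed_cover_ring n k offset → Spec_alternating_k_2k_seed_cover_ring n k offset (alternating_k_2k_seed_cover_ring n k offset)

-- ===== LEMMAS AND PROOFS =====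

-- the index sequence the k,2k walk realises: after t iterations the walk sits at
-- offset + k * pvF t, and pvF enumerates {m | m % 3 ≠ 2} in increasing order
def pvF (t : Nat) : Nat := 3 * (t / 2) + t % 2

-- walk position after t iterations
def pvP (n : Int) (k : Int) (offset : Int) (t : Nat) : Int :=
  PySem.Int.mod (offset + k * (pvF t : Int)) n

lemma pvGcdFuel_eq_gcd (f a b : Nat) (h : b < f) : pvGcdFuel f a b = Nat.gcd a b := by
  induction f generalizing a b with
  | zero => omega
  | succ f ih =>
    simp only [pvGcdFuel]
    split
    · simp [*]
    · rename_i hb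
      rw [ih b (a % b) (by have := Nat.mod_lt a (Nat.pos_of_ne_zero hb); omega)]
      rw [Nat.gcd_comm b (a % b), ← Nat.gcd_rec b a, Nat.gcd_comm]

lemma pvGcd_eq_gcd (a b : Nat) : pvGcd a b = Nat.gcd a b :=
  pvGcdFuel_eq_gcd _ a b (Nat.lt_succ_self b)

lemma pv_dvd_iff (n K m : Nat) (h : 0 < n) : n ∣ K * m ↔ (n / Nat.gcd n K) ∣ m := by
  set g := Nat.gcd n K with hg
  have hgpos : 0 < g := Nat.gcd_pos_of_pos_left K h
  have hn' : g * (n / g) = n := Nat.mul_div_cancel' (Nat.gcd_dvd_left n K)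
  have hk' : g * (K / g) = K := Nat.mul_div_cancel' (Nat.gcd_dvd_right n K)
  have hco : Nat.Coprime (n / g) (K / g) := Nat.coprime_div_gcd_div_gcd hgpos
  constructor
  · intro hd
    have h1 : g * (n / g) ∣ g * ((K / g) * m) := by
      rw [hn', ← Nat.mul_assoc, hk']; exact hd
    have h2 : (n / g) ∣ (K / g) * m := (Nat.mul_dvd_mul_iff_left hgpos).mp h1
    exact hco.dvd_of_dvd_mul_left h2
  · intro hd
    obtain ⟨c, hc⟩ := hd
    refine ⟨(K / g) * c, ?_⟩
    subst hc
    calc K * (n / g * c) = (g * (K / g)) * (n / g * c) := by rw [hk']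
    _ = (g * (n / g)) * ((K / g) * c) := by ring
    _ = n * ((K / g) * c) := by rw [hn']

-- Python floor-mod: equal residues iff the divisor divides the difference
lemma pv_mod_eq_iff (n a b : Int) (hn : n ≠ 0) :
    PySem.Int.mod a n = PySem.Int.mod b n ↔ n ∣ (a - b) := by
  have ha := PySem.Int.floordiv_mul_add_mod a n
  have hb := PySem.Int.floordiv_mul_add_mod b n
  constructor
  · intro h
    refine ⟨PySem.Int.floordiv a n - PySem.Int.floordiv b n, ?_⟩
    nlinarith [ha, hb]
  · intro ⟨c, hc⟩
    have hdvd : n ∣ (PySem.Int.mod a n - PySem.Int.mod b n) := by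
      refine ⟨c - PySem.Int.floordiv a n + PySem.Int.floordiv b n, ?_⟩
      nlinarith [ha, hb]
    have habs : |PySem.Int.mod a n - PySem.Int.mod b n| < |n| := by
      rcases lt_or_gt_of_ne hn with hneg | hpos
      · have b1 := PySem.Int.mod_neg_bounds a hneg
        have b2 := PySem.Int.mod_neg_bounds b hneg
        rw [abs_sub_lt_iff]; rw [abs_of_neg hneg]; omega
      · have b1 := PySem.Int.mod_nonneg a hpos
        have b2 := PySem.Int.mod_nonneg b hpos
        have b3 := PySem.Int.mod_lt a hpos
        have b4 := PySem.Int.mod_lt b hpos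
        rw [abs_sub_lt_iff]; rw [abs_of_pos hpos]; omega
    have := Int.eq_zero_of_abs_lt_dvd ((abs_dvd n _).mpr hdvd) habs
    omega

lemma pv_mod_add_left (n a s : Int) (hn : n ≠ 0) :
    PySem.Int.mod (PySem.Int.mod a n + s) n = PySem.Int.mod (a + s) n := by
  rw [pv_mod_eq_iff _ _ _ hn]
  have := PySem.Int.floordiv_mul_add_mod a n
  exact ⟨-(PySem.Int.floordiv a n), by nlinarith⟩

-- the filtered range underlying B is exactly the image of pvF
lemma pv_filter_range (T : Nat) :
    (PySem.List.pyRange 0 ((pvF T : Nat) : Int) 1).filter (fun m => decide (PySem.Int.mod m 3 ≠ 2))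
      = (List.range T).map (fun t => ((pvF t : Nat) : Int)) := by
  induction T with
  | zero =>
      rw [show pvF 0 = 0 from rfl]
      rw [PySem.List.pyRange_one_eq_nil (by norm_num)]
      simp
  | succ T ih =>
    have hm3 : pvF T % 3 = T % 2 := by unfold pvF; omega
    by_cases hT : T % 2 = 0
    · have h1 : ((pvF (T + 1) : Nat) : Int) = ((pvF T : Nat) : Int) + 1 := by
        unfold pvF; push_cast; omega
      rw [h1, PySem.List.pyRange_one_succ_right (by positivity), List.filter_append, ih,
        List.range_succ, List.map_append]
      congr 1
      simp
      omega
    · have h2 : ((pvF (T + 1) : Nat) : Int) = (((pvF T + 1 : Nat)) : Int) + 1 := by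
        unfold pvF; push_cast; omega
      have hmod2 : (pvF T + 1) % 3 = 2 := by omega
      rw [h2, PySem.List.pyRange_one_succ_right (by positivity), List.filter_append]
      have hdrop : List.filter (fun m => decide (PySem.Int.mod m 3 ≠ 2)) [((pvF T + 1 : Nat) : Int)] = [] := by
        simp
        omega
      rw [hdrop, List.append_nil,
        show (((pvF T + 1 : Nat)) : Int) = ((pvF T : Nat) : Int) + 1 by push_cast; ring,
        PySem.List.pyRange_one_succ_right (by positivity), List.filter_append, ih,
        List.range_succ, List.map_append]
      congr 1
      simp
      omega

-- A's loop, run from the state after t iterations, breaks exactly when the walk index reaches tS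
lemma pv_loop_run (n k offset : Int) (hn : n ≠ 0) (tS : Nat)
    (hiff : ∀ s : Nat, 1 ≤ s → s ≤ tS → (n ∣ k * (pvF s : Int) ↔ s = tS)) :
    ∀ (j fuel t : Nat), t + 1 + j = tS → j < fuel →
      pvLoopA n k fuel (pvP n k offset t) ((List.range (t + 1)).map (pvP n k offset)) t
        = (List.range tS).map (pvP n k offset) := by
  intro j
  induction j with
  | zero =>
      intro fuel t ht hf
      match fuel, hf with
      | fuel + 1, _ =>
        simp only [pvLoopA]
        have hstep : PySem.Int.mod (pvP n k offset t + (if t % 2 = 0 then k else 2 * k)) n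
            = pvP n k offset (t + 1) := by
          unfold pvP
          rw [pv_mod_add_left _ _ _ hn]
          congr 1
          have h3 : ((pvF (t + 1) : Nat) : Int) = ((pvF t : Nat) : Int) + (if t % 2 = 0 then 1 else 2) := by
            unfold pvF; split_ifs <;> (push_cast; omega)
          rw [h3]; split_ifs <;> ring
        have hhead : PySem.List.pyGetD ((List.range (t + 1)).map (pvP n k offset)) 0 0
            = pvP n k offset 0 := by
          rw [PySem.List.pyGetD_zero, List.range_succ_eq_map]
          simp
        have hbrk : pvP n k offset (t + 1) = pvP n k offset 0 := by
          unfold pvP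
          rw [pv_mod_eq_iff _ _ _ hn]
          have : (offset + k * ((pvF (t + 1) : Nat) : Int)) - (offset + k * ((pvF 0 : Nat) : Int))
              = k * ((pvF (t + 1) : Nat) : Int) := by
            rw [show pvF 0 = 0 from rfl]; push_cast; ring
          rw [this]
          exact (hiff (t + 1) (by omega) (by omega)).mpr (by omega)
        rw [hstep, hhead, if_pos hbrk, show t + 1 = tS by omega]
  | succ j ih =>
      intro fuel t ht hf
      match fuel, hf with
      | fuel + 1, hf =>
        simp only [pvLoopA]
        have hstep : PySem.Int.mod (pvP n k offset t + (if t % 2 = 0 then k else 2 * k)) n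
            = pvP n k offset (t + 1) := by
          unfold pvP
          rw [pv_mod_add_left _ _ _ hn]
          congr 1
          have h3 : ((pvF (t + 1) : Nat) : Int) = ((pvF t : Nat) : Int) + (if t % 2 = 0 then 1 else 2) := by
            unfold pvF; split_ifs <;> (push_cast; omega)
          rw [h3]; split_ifs <;> ring
        have hhead : PySem.List.pyGetD ((List.range (t + 1)).map (pvP n k offset)) 0 0
            = pvP n k offset 0 := by
          rw [PySem.List.pyGetD_zero, List.range_succ_eq_map]
          simp
        have hbrk : ¬ (pvP n k offset (t + 1) = pvP n k offset 0) := by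
          unfold pvP
          rw [pv_mod_eq_iff _ _ _ hn]
          have : (offset + k * ((pvF (t + 1) : Nat) : Int)) - (offset + k * ((pvF 0 : Nat) : Int))
              = k * ((pvF (t + 1) : Nat) : Int) := by
            rw [show pvF 0 = 0 from rfl]; push_cast; ring
          rw [this]
          intro hdvd
          have := (hiff (t + 1) (by omega) (by omega)).mp hdvd
          omega
        rw [hstep, hhead, if_neg hbrk]
        have hHapp : (List.range (t + 1)).map (pvP n k offset) ++ [pvP n k offset (t + 1)]
            = (List.range (t + 2)).map (pvP n k offset) := by
          rw [List.range_succ (n := t + 1), List.map_append]; rfl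
        rw [hHapp]
        exact ih fuel (t + 1) (by omega) (by omega)

theorem pv_main (n k offset : Int)
    (hpre : ¬ ((n < 0 ∧ k ≤ 0 ∧ n < 2 * k) ∨ (n = 0 ∧ k ≤ 0))) :
    alternating_k_2k_seed_cover_ring n k offset = alternating_k_2k_seed_cover_ring_alt n k offset := by
  unfold alternating_k_2k_seed_cover_ring alternating_k_2k_seed_cover_ring_alt
  by_cases hbr : 2 * k > n
  · rw [if_pos hbr, if_pos hbr]
  · rw [if_neg hbr, if_neg hbr]
    have hn : n ≠ 0 := by
      intro h0
      exact hpre (Or.inr ⟨h0, by omega⟩)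
    have hN : 0 < n.natAbs := Int.natAbs_pos.mpr hn
    set N := n.natAbs with hNdef
    set K := k.natAbs with hKdef
    set g := Nat.gcd N K with hgdef
    have hg : 0 < g := Nat.gcd_pos_of_pos_left K hN
    set d := N / g with hddef
    have hdN : d ≤ N := Nat.div_le_self N g
    have hd : 0 < d := Nat.div_pos (Nat.le_of_dvd hN (Nat.gcd_dvd_left N K)) hg
    set mS := if d % 3 ≠ 2 then d else 2 * d with hmSdef
    have hmS3 : mS % 3 ≠ 2 := by
      rw [hmSdef]; split_ifs with h <;> omega
    have hmS1 : 1 ≤ mS := by rw [hmSdef]; split_ifs <;> omega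
    have hmS2d : mS ≤ 2 * d := by rw [hmSdef]; split_ifs <;> omega
    set tS := 2 * (mS / 3) + mS % 3 with htSdef
    have hF : pvF tS = mS := by unfold pvF; omega
    have htS1 : 1 ≤ tS := by omega
    have htSb : tS ≤ 2 * N + 1 := by omega
    have hdvdIff : ∀ m : Nat, (n ∣ k * (m : Int)) ↔ d ∣ m := by
      intro m
      rw [← Int.natAbs_dvd_natAbs, Int.natAbs_mul, Int.natAbs_natCast]
      exact pv_dvd_iff N K m hN
    have hiff : ∀ s : Nat, 1 ≤ s → s ≤ tS → (n ∣ k * (pvF s : Int) ↔ s = tS) := by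
      intro s h1 h2
      rw [hdvdIff]
      constructor
      · intro hdl
        have hle : pvF s ≤ mS := by rw [← hF]; unfold pvF; omega
        have hpos : 1 ≤ pvF s := by unfold pvF; omega
        have hs3 : pvF s % 3 ≠ 2 := by unfold pvF; omega
        have hFeq : pvF s = mS := by
          by_cases hd3 : d % 3 ≠ 2
          · have hmd : mS = d := by rw [hmSdef, if_pos hd3]
            have := Nat.le_of_dvd (by omega) hdl
            omega
          · have hmd : mS = 2 * d := by rw [hmSdef, if_neg hd3]
            obtain ⟨c, hc⟩ := hdl
            rcases Nat.lt_or_ge c 2 with hc2 | hc2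
            · interval_cases c <;> omega
            · have : d * 2 ≤ d * c := Nat.mul_le_mul_left d hc2
              omega
        have : pvF s = pvF tS := by rw [hF]; exact hFeq
        unfold pvF at this; omega
      · rintro rfl
        rw [hF, hmSdef]
        split_ifs
        · exact dvd_refl d
        · exact dvd_mul_left d 2
    have h0 : pvP n k offset 0 = PySem.Int.mod offset n := by
      unfold pvP
      norm_num [pvF]
    have hrun := pv_loop_run n k offset hn tS hiff (tS - 1) (2 * N + 2) 0 (by omega) (by omega)
    rw [show (0 : Nat) + 1 = 1 from rfl] at hrun
    simp only [List.range_one, List.map_cons, List.map_nil] at hrun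
    rw [h0] at hrun
    simp only []
    rw [pvGcd_eq_gcd]
    rw [← hgdef, ← hddef, ← hmSdef]
    rw [hrun]
    congr 1
    rw [show ((mS : Nat) : Int) = ((pvF tS : Nat) : Int) by rw [hF]]
    rw [pv_filter_range tS, List.map_map]
    rfl

-- ===== VERDICT (by name: the statement is the Claim_ definition above) =====
theorem alternating_k_2k_seed_cover_ring_spec : Claim_equal_alternating_k_2k_seed_cover_ring := by
  intro n k offset _ hpre
  unfold Spec_alternating_k_2k_seed_cover_ring
  exact pv_main n k offset hpre
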